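-- pv_equiv track=rewrite | github.com/Xopoko/Experiment-26_P_vs_NP | scripts/toy_q39_rank2.py | _rank_two
-- ===== SOURCE A (Python) =====
-- from typing import Dict, List, Tuple
--
-- def _rank_two(vec1: List[int], vec2: List[int]) -> int:
--     zero1 = all(bit == 0 for bit in vec1)
--     zero2 = all(bit == 0 for bit in vec2)
--     if zero1 and zero2:
--         return 0
--     if zero1 or zero2:
--         return 1
--     if vec1 == vec2:
--         return 1
--     return 2
-- ===== SOURCE B (Python) =====
-- def _rank_two(vec1, vec2):
--     return len({tuple(v) for v in (vec1, vec2) if any(v)})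
-- ===== Notes on version B (the rewrite author's own statement) =====
-- stated objective: simpler
-- what changed: Replaces the three staged boolean guards (zero1/zero2/equality) with a single dedup-and-count: collect the nonzero vectors of the pair into a set and return its size.
import Mathlib
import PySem

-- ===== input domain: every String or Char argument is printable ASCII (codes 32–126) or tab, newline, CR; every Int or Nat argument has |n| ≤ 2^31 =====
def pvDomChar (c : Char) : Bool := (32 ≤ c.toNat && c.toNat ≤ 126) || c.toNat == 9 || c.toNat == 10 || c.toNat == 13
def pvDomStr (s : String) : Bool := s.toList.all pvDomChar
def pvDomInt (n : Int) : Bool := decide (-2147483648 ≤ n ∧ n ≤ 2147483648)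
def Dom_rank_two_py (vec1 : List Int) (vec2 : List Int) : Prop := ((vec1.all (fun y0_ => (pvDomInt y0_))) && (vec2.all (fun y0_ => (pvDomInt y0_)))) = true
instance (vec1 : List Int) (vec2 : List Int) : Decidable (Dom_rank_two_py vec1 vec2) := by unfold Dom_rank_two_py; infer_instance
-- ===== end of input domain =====

-- B replaces A's three staged boolean guards with one dedup-and-count over the set of nonzero vectors (objective: simpler).

-- ===== PORT A =====
def rank_two_py (vec1 : List Int) (vec2 : List Int) : Int :=
  let zero1 := vec1.all (fun bit => bit == 0)
  let zero2 := vec2.all (fun bit => bit == 0)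
  if zero1 && zero2 then 0
  else if zero1 || zero2 then 1
  else if vec1 == vec2 then 1
  else 2

-- ===== PORT B =====
def rank_two_py_alt (vec1 : List Int) (vec2 : List Int) : Int :=
  PySem.Set.len (PySem.Set.ofList (([vec1, vec2]).filter (fun v => v.any (fun bit => !(bit == 0)))))

-- ===== PRECONDITION & SPEC =====
def Spec_rank_two_py (vec1 : List Int) (vec2 : List Int) (out : Int) : Prop := out = rank_two_py_alt vec1 vec2
instance (vec1 : List Int) (vec2 : List Int) (out : Int) : Decidable (Spec_rank_two_py vec1 vec2 out) := by unfold Spec_rank_two_py; infer_instance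

-- ===== CLAIM (what is proved, stated in full; the proofs are below) =====
def Claim_equal_rank_two_py : Prop := ∀ (vec1 : List Int) (vec2 : List Int), Dom_rank_two_py vec1 vec2 → Spec_rank_two_py vec1 vec2 (rank_two_py vec1 vec2)

-- ===== LEMMAS AND PROOFS =====
theorem any_ne_eq_not_all (v : List Int) : (v.any (fun bit => !(bit == 0))) = !(v.all (fun bit => bit == 0)) := by
  simp [List.any_eq_not_all_not]

-- ===== VERDICT (by name: the statement is the Claim_ definition above) =====
theorem rank_two_py_spec : Claim_equal_rank_two_py := by
  intro vec1 vec2 _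
  unfold Spec_rank_two_py rank_two_py rank_two_py_alt
  simp only [List.filter, any_ne_eq_not_all]
  cases h1 : vec1.all (fun bit => bit == 0) <;>
  cases h2 : vec2.all (fun bit => bit == 0) <;>
  by_cases h3 : vec1 = vec2 <;>
  simp_all [PySem.Set.ofList, PySem.Set.add, PySem.Set.len, PySem.Set.contains,
            List.foldl] <;>
  (rw [if_neg (fun h : vec2 = vec1 => h3 h.symm)]; rfl)
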